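-- pv_equiv track=rewrite | github.com/chanys/tnlp | src/model/seq2seq_model/seq2seq_utils.py | convert_token_example_to_seq2seq
-- ===== SOURCE A (Python) =====
-- from typing import List
--
-- def convert_bio_to_labeled_tuples(labels: List[str]):
--     """ From a list of BIO tags, condense into tuples of (start-token-index, end-token-index, tag)
--     E.g.:
--     index:  0  1     2       3    4          5         6    7    8
--     token: In an explosion   ,  many       people    will  get  hurt
--     labels: O  O     O       O  B-Patient  I-Patient   O    O    O
--
--     We generate: (4, 5, Patient)
--     """
--     matches = []
--     i = 0
--
--     while i < len(labels):
--         if labels[i].startswith("B-"):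
--             start, end = i, i + 1
--
--             while end < len(labels) and (labels[end] == "I-" + labels[start][2:]):
--                 end += 1
--
--             matches.append((start, end - 1, labels[start][2:]))
--             i = end
--         else:
--             i += 1
--
--     return matches
--
-- class SpanNode:
--     def __init__(self, start: int, end: int, label: str = None):
--         self.start = start
--         self.end = end
--         self.label = label
--         self.children = []
--         self.parent = None
--
--     def __str__(self):
--         return f"({self.start}, {self.end}, {self.label}, {len(self.children)})"
--
-- def convert_token_example_to_seq2seq(tokens: List[str], labels: List[str]):
--     assert len(tokens) == len(labels)
--
--     labeled_tuples = convert_bio_to_labeled_tuples(labels)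
--
--     # sort by (ascending) start-position. If this is the same, then sort by (decending) end-position.
--     # this ensures if span A encompasses span B, then span A will be in front of span B in the sorted list.
--     labeled_tuples = sorted(labeled_tuples, key=lambda x: (x[0], -x[1]))
--
--     # convert each tuple to a SpanNode
--     span_nodes = [SpanNode(start=start, end=end, label=label) for (start, end, label) in labeled_tuples]
--
--     # add parent-child relations
--     for index, span_node in enumerate(span_nodes):
--         for i in range(index - 1, -1, -1):
--             parent_candidate = span_nodes[i]
--             if parent_candidate.start <= span_node.start and span_node.end <= parent_candidate.end:
--                 parent_candidate.children.append(span_node)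
--                 span_node.parent = parent_candidate
--                 break
--
--     root_node = SpanNode(start=0, end=len(tokens) - 1)
--     for span_node in span_nodes:
--         if span_node.parent is None:
--             root_node.children.append(span_node)
--
--     return span_node_tree_to_augmented_output(root_node, tokens)
--
-- def span_node_tree_to_augmented_output(node: SpanNode, tokens: List[str]) -> str:
--     if len(node.children) == 0:
--         node_tokens_string = ' '.join(tokens[i] for i in range(node.start, node.end + 1))
--         return f"[ {node_tokens_string} | {node.label} ]"
--
--     start = node.start
--
--     ret = []
--
--     for child in node.children:
--         child_output = span_node_tree_to_augmented_output(child, tokens)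
--
--         for i in range(start, child.start):
--             ret.append(tokens[i])
--
--         ret.append(child_output)
--         start = child.end + 1
--
--     for i in range(start, node.end + 1):
--         ret.append(tokens[i])
--
--     if node.label is not None:
--         ret.append("|")
--         ret.append(node.label)
--
--     return ' '.join(ret)
-- ===== SOURCE B (Python) =====
-- from typing import List, Optional
--
-- def convert_bio_to_labeled_tuples(labels: List[str]):
--     matches = []
--     i = 0
--     while i < len(labels):
--         if labels[i].startswith("B-"):
--             start, end = i, i + 1
--             while end < len(labels) and (labels[end] == "I-" + labels[start][2:]):
--                 end += 1
--             matches.append((start, end - 1, labels[start][2:]))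
--             i = end
--         else:
--             i += 1
--     return matches
--
-- def chunk(words: List[str], label: Optional[str]) -> str:
--     """One bracketed chunk of the output grammar."""
--     return f"[ {' '.join(words)} | {label} ]"
--
-- def render(tokens: List[str], start: int, end: int, label: Optional[str],
--            children: List[tuple]) -> str:
--     """Render the span tokens[start:end+1] holding the given child spans:
--     a childless span is one bracketed chunk; otherwise the children are
--     rendered in place, each as a chunk, with a trailing label if any."""
--     if not children:
--         return chunk(tokens[start:end + 1], label)
--     parts = []
--     pos = start
--     for s, e, tag in children:
--         parts += tokens[pos:s]
--         parts.append(chunk(tokens[s:e + 1], tag))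
--         pos = e + 1
--     parts += tokens[pos:end + 1]
--     if label is not None:
--         parts += ["|", label]
--     return " ".join(parts)
--
-- def convert_token_example_to_seq2seq(tokens: List[str], labels: List[str]):
--     assert len(tokens) == len(labels)
--     # Spans extracted from a single BIO tag sequence are disjoint and already
--     # in start order, so the span structure is flat: render the whole sentence
--     # as one unlabelled span over them, in a single linear pass.
--     return render(tokens, 0, len(tokens) - 1, None, convert_bio_to_labeled_tuples(labels))
-- ===== Notes on version B (the rewrite author's own statement) =====
-- stated objective: simpler
-- what changed: BIO spans extracted from one tag sequence are disjoint and already start-ordered, so the span structure is flat: B drops A's sort, SpanNode tree and backwards parent search and renders the sentence as one unlabelled span over its chunks in a single pass.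
import Mathlib
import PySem

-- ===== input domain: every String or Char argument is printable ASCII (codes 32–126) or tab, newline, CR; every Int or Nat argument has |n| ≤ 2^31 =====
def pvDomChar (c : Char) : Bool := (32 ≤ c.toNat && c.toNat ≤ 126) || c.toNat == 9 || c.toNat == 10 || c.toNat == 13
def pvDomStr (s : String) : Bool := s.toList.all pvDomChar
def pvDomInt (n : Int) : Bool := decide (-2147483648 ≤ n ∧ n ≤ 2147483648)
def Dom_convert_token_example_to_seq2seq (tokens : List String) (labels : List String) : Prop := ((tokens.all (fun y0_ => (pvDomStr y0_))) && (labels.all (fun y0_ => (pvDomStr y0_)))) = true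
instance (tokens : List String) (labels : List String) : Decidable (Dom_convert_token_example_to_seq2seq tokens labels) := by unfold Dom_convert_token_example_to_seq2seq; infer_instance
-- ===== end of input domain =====

-- B replaces A's sort + SpanNode tree + backwards parent search by a single render pass
-- over the (provably disjoint, start-ordered) BIO span list: same output, simpler code.


-- ===== PORT A =====
-- labels[start][2:]
def pvTag (s : String) : String := PySem.Str.slice s (some 2) none

-- inner while: count how many further labels[end] == "I-" + tag (end = e + this count);
-- structural fuel only makes the loop total: fuel = labels.length always suffices
def pvBioInnerCnt (labels : List String) (tag : String) : Nat → Nat → Nat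
  | 0, _ => 0
  | fuel + 1, e =>
    if e < labels.length then
      if labels.getD e "" == "I-" ++ tag then pvBioInnerCnt labels tag fuel (e + 1) + 1 else 0
    else 0

-- outer while of convert_bio_to_labeled_tuples (same fuel discipline: i grows every step)
def pvBioLoop (labels : List String) : Nat → Nat → List (Nat × Nat × String)
  | 0, _ => []
  | fuel + 1, i =>
    if i < labels.length then
      if PySem.Str.startswith (labels.getD i "") "B-" then
        let tag := pvTag (labels.getD i "")
        let e := i + 1 + pvBioInnerCnt labels tag labels.length (i + 1)
        (i, e - 1, tag) :: pvBioLoop labels fuel e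
      else pvBioLoop labels fuel (i + 1)
    else []

def convert_bio_to_labeled_tuples (labels : List String) : List (Nat × Nat × String) :=
  pvBioLoop labels labels.length 0

-- Python sort key (x[0], -x[1]) : tuples compare lexicographically
def pvKey (x : Nat × Nat × String) : Lex (Int × Int) := toLex ((x.1 : Int), -(x.2.1 : Int))

-- inner backwards for-loop with break: first j in range(index-1, -1, -1) whose span contains ours
def pvFindParent (spans : List (Nat × Nat × String)) (idx s e : Nat) : Option Int :=
  (PySem.List.pyRange ((idx : Int) - 1) (-1) (-1)).find? (fun j =>
    let c := PySem.List.pyGetD spans j (0, 0, "")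
    decide (c.1 ≤ s) && decide (e ≤ c.2.1))

-- the parent/children mutation loop, as index tables (children lists, parent pointer)
def pvBuildTables (spans : List (Nat × Nat × String)) : List (List Nat) × List (Option Nat) :=
  (List.range spans.length).foldl (fun tb idx =>
    let sp := spans.getD idx (0, 0, "")
    match pvFindParent spans idx sp.1 sp.2.1 with
    | some p => (tb.1.set p.toNat (tb.1.getD p.toNat [] ++ [idx]), tb.2.set idx (some p.toNat))
    | none => tb)
    (List.replicate spans.length [], List.replicate spans.length none)

-- span_node_tree_to_augmented_output; fuel bounds the recursion depth (child indices strictly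
-- grow, so fuel = number-of-spans + 1 always suffices for the tables pvBuildTables produces)
def pvAug (tokens : List String) (spans : List (Nat × Nat × String)) (children : List (List Nat)) :
    Nat → Int → Int → Option String → List Nat → String
  | 0, _, _, _, _ => ""
  | fuel + 1, st, en, label, childIdxs =>
    if childIdxs.isEmpty then
      "[ " ++ PySem.Str.join " "
          ((PySem.List.pyRange st (en + 1) 1).map (fun i => PySem.List.pyGetD tokens i "")) ++
        " | " ++ (match label with | some l => l | none => "None") ++ " ]"
    else
      let acc := childIdxs.foldl (fun (acc : Int × List String) cIdx =>
        let c := spans.getD cIdx (0, 0, "")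
        let childOut := pvAug tokens spans children fuel (c.1 : Int) (c.2.1 : Int) (some c.2.2)
          (children.getD cIdx [])
        ((c.2.1 : Int) + 1,
          acc.2 ++ (PySem.List.pyRange acc.1 (c.1 : Int) 1).map (fun i => PySem.List.pyGetD tokens i "")
            ++ [childOut]))
        (st, [])
      PySem.Str.join " "
        (acc.2 ++ (PySem.List.pyRange acc.1 (en + 1) 1).map (fun i => PySem.List.pyGetD tokens i "")
          ++ (match label with | some l => ["|", l] | none => []))

def convert_token_example_to_seq2seq (tokens : List String) (labels : List String) : String :=
  let lt := convert_bio_to_labeled_tuples labels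
  let spans := PySem.List.sorted lt pvKey
  let tables := pvBuildTables spans
  let rootChildren := (List.range spans.length).foldl
    (fun acc idx => if (tables.2.getD idx none).isNone then acc ++ [idx] else acc) []
  pvAug tokens spans tables.1 (spans.length + 1) 0 ((tokens.length : Int) - 1) none rootChildren

-- ===== PORT B =====
-- chunk(words, label): one bracketed chunk of the output grammar (f-string prints None as "None")
def pvChunk (words : List String) (label : Option String) : String :=
  "[ " ++ PySem.Str.join " " words ++ " | " ++
    (match label with | some l => l | none => "None") ++ " ]"

-- render(tokens, start, end, label, children)
def pvRender (tokens : List String) (start fin : Int) (label : Option String)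
    (children : List (Nat × Nat × String)) : String :=
  if children.isEmpty then
    pvChunk (PySem.List.slice tokens (some start) (some (fin + 1))) label
  else
    let acc := children.foldl (fun (acc : Int × List String) sp =>
      ((sp.2.1 : Int) + 1,
        acc.2 ++ PySem.List.slice tokens (some acc.1) (some (sp.1 : Int)) ++
          [pvChunk (PySem.List.slice tokens (some (sp.1 : Int)) (some ((sp.2.1 : Int) + 1)))
            (some sp.2.2)]))
      (start, [])
    PySem.Str.join " "
      (acc.2 ++ PySem.List.slice tokens (some acc.1) (some (fin + 1)) ++
        (match label with | some l => ["|", l] | none => []))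

def convert_token_example_to_seq2seq_alt (tokens : List String) (labels : List String) : String :=
  pvRender tokens 0 ((tokens.length : Int) - 1) none (convert_bio_to_labeled_tuples labels)

-- ===== PRECONDITION & SPEC =====
-- Python A asserts len(tokens) == len(labels) and raises AssertionError otherwise
def Pre_convert_token_example_to_seq2seq (tokens : List String) (labels : List String) : Prop :=
  tokens.length = labels.length
instance (tokens : List String) (labels : List String) :
    Decidable (Pre_convert_token_example_to_seq2seq tokens labels) := by
  unfold Pre_convert_token_example_to_seq2seq; infer_instance

def pvWitness_convert_token_example_to_seq2seq : List String × List String :=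
  (["In", "an", "explosion", "many", "people"], ["O", "O", "O", "B-Patient", "I-Patient"])

def Spec_convert_token_example_to_seq2seq (tokens : List String) (labels : List String) (out : String) : Prop := out = convert_token_example_to_seq2seq_alt tokens labels
instance (tokens : List String) (labels : List String) (out : String) : Decidable (Spec_convert_token_example_to_seq2seq tokens labels out) := by unfold Spec_convert_token_example_to_seq2seq; infer_instance

-- ===== CLAIM (what is proved, stated in full; the proofs are below) =====
def Claim_equal_convert_token_example_to_seq2seq : Prop := ∀ (tokens : List String) (labels : List String), Dom_convert_token_example_to_seq2seq tokens labels → Pre_convert_token_example_to_seq2seq tokens labels → Spec_convert_token_example_to_seq2seq tokens labels (convert_token_example_to_seq2seq tokens labels)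

-- ===== LEMMAS AND PROOFS =====

theorem pvBioInnerCnt_le (labels : List String) (tag : String) (fuel e : Nat)
    (h : e ≤ labels.length) : e + pvBioInnerCnt labels tag fuel e ≤ labels.length := by
  fun_induction pvBioInnerCnt labels tag fuel e with
  | case1 => omega
  | case2 fuel e h hb ih => have := ih (by omega); omega
  | case3 fuel e h hb => omega
  | case4 fuel e h => omega

def pvLinked (m N : Nat) : List (Nat × Nat × String) → Prop
  | [] => True
  | x :: rest => m ≤ x.1 ∧ x.1 ≤ x.2.1 ∧ x.2.1 < N ∧ pvLinked (x.2.1 + 1) N rest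

theorem pvLinked_mono_aux {m N k : Nat} {l : List (Nat × Nat × String)}
    (h : pvLinked m N l) (hk : k ≤ m) : pvLinked k N l := by
  cases l with
  | nil => trivial
  | cons x rest => exact ⟨by have := h.1; omega, h.2.1, h.2.2.1, h.2.2.2⟩

theorem pvLinked_bioLoop (labels : List String) (fuel i : Nat) :
    pvLinked i labels.length (pvBioLoop labels fuel i) := by
  fun_induction pvBioLoop labels fuel i with
  | case1 => trivial
  | case2 fuel i h hb tag e ih =>
    have h1 : i + 1 ≤ e := by omega
    have h2 : e ≤ labels.length := by
      have := pvBioInnerCnt_le labels tag labels.length (i + 1) (by omega); omega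
    refine ⟨le_rfl, by simp; omega, by simp; omega, ?_⟩
    have he : e - 1 + 1 = e := by omega
    simpa [he] using ih
  | case3 fuel i h hb ih => exact pvLinked_mono_aux ih (by omega)
  | case4 fuel i h => trivial

theorem pvLinked_start_le {m N : Nat} {l : List (Nat × Nat × String)}
    (h : pvLinked m N l) : ∀ y ∈ l, m ≤ y.1 := by
  induction l generalizing m with
  | nil => intro y hy; cases hy
  | cons x rest ih =>
    intro y hy
    rcases List.mem_cons.mp hy with rfl | hy
    · exact h.1
    · have hx := h.1; have hx2 := h.2.1
      have := ih (pvLinked_mono_aux h.2.2.2 (le_refl _)) y hy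
      omega

theorem pvLinked_pairwise {m N : Nat} {l : List (Nat × Nat × String)}
    (h : pvLinked m N l) : l.Pairwise (fun a b => a.2.1 < b.1) := by
  induction l generalizing m with
  | nil => exact List.Pairwise.nil
  | cons x rest ih =>
    refine List.Pairwise.cons ?_ (ih h.2.2.2)
    intro y hy
    have := pvLinked_start_le h.2.2.2 y hy
    omega

theorem pvLinked_elem {m N : Nat} {l : List (Nat × Nat × String)}
    (h : pvLinked m N l) : ∀ i (hi : i < l.length), l[i].1 ≤ l[i].2.1 ∧ l[i].2.1 < N := by
  induction l generalizing m with
  | nil => intro i hi; simp at hi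
  | cons x rest ih =>
    intro i hi
    cases i with
    | zero => exact ⟨h.2.1, h.2.2.1⟩
    | succ j => exact ih h.2.2.2 j (by simpa using hi)

theorem pvLinked_key_pairwise {m N : Nat} {l : List (Nat × Nat × String)}
    (h : pvLinked m N l) : l.Pairwise (fun a b => pvKey a < pvKey b) := by
  induction l generalizing m with
  | nil => exact List.Pairwise.nil
  | cons x rest ih =>
    refine List.Pairwise.cons ?_ (ih h.2.2.2)
    intro y hy
    have h1 := pvLinked_start_le h.2.2.2 y hy
    have h2 := h.2.1
    show pvKey x < pvKey y
    simp only [pvKey, Prod.Lex.toLex_lt_toLex]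
    left
    omega

theorem pvSorted_eq {m N : Nat} {l : List (Nat × Nat × String)}
    (h : pvLinked m N l) : PySem.List.sorted l pvKey = l :=
  PySem.List.sorted_eq_of_perm_of_pairwise_lt l l pvKey (List.Perm.refl l) (pvLinked_key_pairwise h)

theorem pvFindParent_none {m N : Nat} {spans : List (Nat × Nat × String)}
    (h : pvLinked m N spans) (idx : Nat) (hidx : idx < spans.length) :
    pvFindParent spans idx (spans.getD idx (0,0,"")).1 (spans.getD idx (0,0,"")).2.1 = none := by
  have hget : spans.getD idx (0,0,"") = spans[idx] := List.getD_eq_getElem spans _ hidx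
  apply List.find?_eq_none.mpr
  intro j hj
  rw [PySem.List.mem_pyRange_neg_one] at hj
  have hj0 : 0 ≤ j := by omega
  have hjlt : j.toNat < idx := by omega
  have hc : PySem.List.pyGetD spans j (0,0,"") = spans[j.toNat] :=
    PySem.List.pyGetD_eq_getElem spans (0,0,"") hj0 (by omega)
  simp only [hc, hget, Bool.and_eq_true, decide_eq_true_eq, not_and]
  have hp := (List.pairwise_iff_getElem.mp (pvLinked_pairwise h)) j.toNat idx (by omega) hidx hjlt
  have he := pvLinked_elem h idx hidx
  intro _
  omega

theorem pvBuildTables_eq {m N : Nat} {spans : List (Nat × Nat × String)}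
    (h : pvLinked m N spans) :
    pvBuildTables spans =
      (List.replicate spans.length [], List.replicate spans.length none) := by
  unfold pvBuildTables
  rw [PySem.List.foldl_congr_mem _ _ (fun tb _ => tb) _ ?_]
  · exact List.foldl_fixed _
  · intro tb idx hidx
    simp only
    rw [pvFindParent_none h idx (by simpa using List.mem_range.mp hidx)]

theorem pvMapRangeAux {α : Type} (xs : List α) (d : α) (k : Nat) :
    ∀ (a : Nat), a + k ≤ xs.length →
    (PySem.List.pyRange (a : Int) ((a : Int) + (k : Int)) 1).map (fun i => PySem.List.pyGetD xs i d) =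
      (xs.drop a).take k := by
  induction k with
  | zero =>
    intro a ha
    simp [PySem.List.pyRange_one_eq_nil]
  | succ k ih =>
    intro a ha
    rw [PySem.List.pyRange_one_cons (by omega)]
    have hd : xs.drop a = xs[a] :: xs.drop (a + 1) :=
      List.drop_eq_getElem_cons (by omega)
    rw [List.map_cons, hd, List.take_succ_cons]
    congr 1
    · rw [PySem.List.pyGetD_eq_getElem xs d (by omega) (by omega)]
      simp
    · have := ih (a + 1) (by omega)
      rw [show ((a : Int) + ((k+1 : Nat) : Int)) = ((a+1 : Nat) : Int) + (k : Int) by push_cast; ring,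
          show ((a : Int) + 1 : Int) = ((a+1 : Nat) : Int) by push_cast; ring]
      exact this

theorem pvMapRange_eq_slice {α : Type} (xs : List α) (d : α) (a b : Nat)
    (hab : a ≤ b) (hb : b ≤ xs.length) :
    (PySem.List.pyRange (a : Int) (b : Int) 1).map (fun i => PySem.List.pyGetD xs i d) =
      PySem.List.slice xs (some (a : Int)) (some (b : Int)) := by
  rw [PySem.List.slice_natCast]
  have := pvMapRangeAux xs d (b - a) a (by omega)
  rw [show ((a : Int) + ((b - a : Nat) : Int)) = (b : Int) by omega] at this
  exact this

theorem pvFoldlRangeGetD {α β : Type} (l : List α) (d : α) (F : β → α → β) (init : β) :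
    (List.range l.length).foldl (fun acc k => F acc (l.getD k d)) init = l.foldl F init := by
  induction l generalizing init with
  | nil => simp
  | cons x t ih =>
    rw [List.length_cons, List.range_succ_eq_map, List.foldl_cons, List.foldl_map]
    simp only [List.getD_cons_zero, List.getD_cons_succ]
    exact ih (F init x)

theorem pvGetD_replicate {α : Type} (n i : Nat) (a : α) :
    (List.replicate n a).getD i a = a := by
  rcases lt_or_ge i n with h | h
  · rw [List.getD_eq_getElem _ _ (by simpa using h)]; simp
  · rw [List.getD_eq_default _ _ (by simpa using h)]

-- A's per-span step after the tree collapses (proof-local name for the fold body)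
def pvFA (tokens : List String) (acc : Int × List String) (c : Nat × Nat × String) :
    Int × List String :=
  ((c.2.1 : Int) + 1,
    acc.2 ++ (PySem.List.pyRange acc.1 (c.1 : Int) 1).map (fun i => PySem.List.pyGetD tokens i "")
      ++ ["[ " ++ PySem.Str.join " "
            ((PySem.List.pyRange (c.1 : Int) ((c.2.1 : Int) + 1) 1).map
              (fun i => PySem.List.pyGetD tokens i "")) ++ " | " ++ c.2.2 ++ " ]"])

-- B's per-span step
def pvFB (tokens : List String) (acc : Int × List String) (sp : Nat × Nat × String) :
    Int × List String :=
  ((sp.2.1 : Int) + 1,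
    acc.2 ++ PySem.List.slice tokens (some acc.1) (some (sp.1 : Int)) ++
      [pvChunk (PySem.List.slice tokens (some (sp.1 : Int)) (some ((sp.2.1 : Int) + 1)))
        (some sp.2.2)])

theorem pvFold_eq (tokens : List String) :
    ∀ (l : List (Nat × Nat × String)) (p : Nat) (parts : List String),
      pvLinked p tokens.length l → p ≤ tokens.length →
      l.foldl (pvFA tokens) ((p : Int), parts) = l.foldl (pvFB tokens) ((p : Int), parts)
      ∧ ∃ q : Nat, (l.foldl (pvFB tokens) ((p : Int), parts)).1 = (q : Int) ∧ q ≤ tokens.length := by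
  intro l
  induction l with
  | nil =>
    intro p parts _ hp
    refine ⟨rfl, ⟨p, ?_, hp⟩⟩
    simp
  | cons c rest ih =>
    intro p parts hL hp
    obtain ⟨h1, h2, h3, h4⟩ := hL
    rw [List.foldl_cons, List.foldl_cons]
    have hB : pvFB tokens ((p : Int), parts) c =
        (((c.2.1 + 1 : Nat) : Int), (pvFB tokens ((p : Int), parts) c).2) := by
      simp [pvFB]
    have hstep : pvFA tokens ((p : Int), parts) c =
        (((c.2.1 + 1 : Nat) : Int), (pvFB tokens ((p : Int), parts) c).2) := by
      rw [← hB]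
      simp only [pvFA, pvFB, pvChunk, Prod.mk.injEq, true_and]
      rw [pvMapRange_eq_slice tokens "" p c.1 h1 (by omega),
          show ((c.2.1 : Int) + 1) = ((c.2.1 + 1 : Nat) : Int) by omega,
          pvMapRange_eq_slice tokens "" c.1 (c.2.1 + 1) (by omega) (by omega)]
    rw [hstep, hB]
    exact ih (c.2.1 + 1) (pvFB tokens ((p : Int), parts) c).2 h4 (by omega)

theorem pvSlice_all (tokens : List String) :
    PySem.List.slice tokens (some ((0 : Nat) : Int)) (some ((tokens.length : Nat) : Int)) = tokens := by
  rw [PySem.List.slice_natCast]; simp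

-- ===== VERDICT (by name: the statement is the Claim_ definition above) =====
theorem convert_token_example_to_seq2seq_spec : Claim_equal_convert_token_example_to_seq2seq := by
  intro tokens labels _ hpre
  unfold Spec_convert_token_example_to_seq2seq
  simp only [convert_token_example_to_seq2seq, convert_token_example_to_seq2seq_alt]
  have hL : pvLinked 0 tokens.length (convert_bio_to_labeled_tuples labels) := by
    rw [hpre]; exact pvLinked_bioLoop labels labels.length 0
  set spans := convert_bio_to_labeled_tuples labels with hspans
  rw [pvSorted_eq hL, pvBuildTables_eq hL]
  simp only [pvGetD_replicate, Option.isNone_none, if_true]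
  rw [PySem.List.foldl_append_singleton]
  simp only [List.nil_append]
  have hlen : ((tokens.length : Int) - 1 + 1) = ((tokens.length : Nat) : Int) := by omega
  rcases hsp : spans with _ | ⟨c, rest⟩
  · -- no spans: both sides are the unlabelled chunk over the whole sentence
    simp only [List.length_nil, List.range_zero, List.isEmpty_nil, if_true, pvAug, pvRender,
      pvChunk]
    rw [hlen, PySem.List.map_pyGetD_pyRange_zero' tokens "",
        show (0 : Int) = ((0 : Nat) : Int) from rfl, pvSlice_all]
  · -- at least one span: flat tree, fold over the children = all spans
    rw [hsp] at hL
    have hne : (c :: rest).isEmpty = false := rfl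
    simp only [hne, List.length_cons, pvRender, Bool.false_eq_true, if_false]
    have hrange : (List.range (rest.length + 1)).isEmpty = false := by simp
    simp only [pvAug, pvGetD_replicate, List.isEmpty_nil, if_true, hrange, Bool.false_eq_true,
      if_false]
    have hAr := pvFoldlRangeGetD (c :: rest) ((0 : Nat), (0 : Nat), ("" : String)) (pvFA tokens)
      ((0 : Int), ([] : List String))
    obtain ⟨hfold, q, hq, hqle⟩ := pvFold_eq tokens (c :: rest) 0 [] hL (Nat.zero_le _)
    simp only [pvFA, List.length_cons, Nat.cast_zero] at hAr hfold hq
    have hlam : (fun (acc : Int × List String) (sp : Nat × Nat × String) =>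
        ((sp.2.1 : Int) + 1,
          acc.2 ++ PySem.List.slice tokens (some acc.1) (some (sp.1 : Int)) ++
            [pvChunk (PySem.List.slice tokens (some (sp.1 : Int)) (some ((sp.2.1 : Int) + 1)))
              (some sp.2.2)])) = pvFB tokens := rfl
    rw [hAr, hfold, hlen, hlam]
    congr 1
    rw [hq, pvMapRange_eq_slice tokens "" q tokens.length hqle le_rfl]
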